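-- pv_equiv track=rewrite | github.com/tr00x/SOMA-Core | src/soma/calibration.py | _typical_burst
-- ===== SOURCE A (Python) =====
-- def _typical_burst(flags: list[bool], truthy: bool) -> int:
--     """Median length of consecutive ``truthy`` runs in ``flags``.
--
--     Used to answer "what's a normal error streak for this user?" — the
--     calibrated phase then fires retry_storm / error_cascade at *more*
--     than that streak, not at the hardcoded 2/3.
--     """
--     runs: list[int] = []
--     cur = 0
--     for f in flags:
--         if bool(f) == truthy:
--             cur += 1
--         else:
--             if cur > 0:
--                 runs.append(cur)
--             cur = 0
--     if cur > 0:
--         runs.append(cur)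
--     if not runs:
--         return 0
--     runs.sort()
--     return int(runs[len(runs) // 2])  # median (lower on even count)
-- ===== SOURCE B (Python) =====
-- def _typical_burst(flags: list[bool], truthy: bool) -> int:
--     """Median length of consecutive truthy runs, via a length-histogram and
--     counting selection instead of collecting and sorting the run list."""
--     counts: dict[int, int] = {}
--     nruns = 0
--     cur = 0
--     for f in flags:
--         if bool(f) == truthy:
--             cur += 1
--         else:
--             if cur > 0:
--                 counts[cur] = counts.get(cur, 0) + 1
--                 nruns += 1
--             cur = 0
--     if cur > 0:
--         counts[cur] = counts.get(cur, 0) + 1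
--         nruns += 1
--     if nruns == 0:
--         return 0
--     k = nruns // 2
--     length = 1
--     while True:
--         c = counts.get(length, 0)
--         if k < c:
--             return length
--         k -= c
--         length += 1
-- ===== Notes on version B (the rewrite author's own statement) =====
-- stated objective: alternative
-- what changed: Instead of collecting all run lengths into a list and sorting it to index the median, B builds a histogram (length -> count) of runs in the same single pass and finds the median by counting selection: it walks lengths 1,2,... subtracting histogram counts until the nruns//2-th smallest run length is reached, so no run list and no sort exist.
import Mathlib
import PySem

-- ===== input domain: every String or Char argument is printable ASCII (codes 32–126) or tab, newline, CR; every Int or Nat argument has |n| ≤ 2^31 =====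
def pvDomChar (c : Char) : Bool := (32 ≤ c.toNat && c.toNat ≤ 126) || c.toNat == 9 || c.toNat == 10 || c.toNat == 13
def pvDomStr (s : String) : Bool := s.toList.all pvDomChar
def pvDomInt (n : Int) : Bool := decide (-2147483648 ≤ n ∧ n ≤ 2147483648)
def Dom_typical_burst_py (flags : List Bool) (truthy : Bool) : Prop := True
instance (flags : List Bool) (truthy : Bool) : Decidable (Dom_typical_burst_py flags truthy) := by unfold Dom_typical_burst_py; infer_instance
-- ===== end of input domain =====

-- B replaces A's run-list + sort + median-index by a run-length histogram built in the same
-- single pass and a counting selection over lengths 1,2,…; alternative algorithm, same value.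

-- ===== PORT A =====
-- A's loop: state (runs, cur); then runs.sort() and runs[len(runs)//2].
-- pyGet? … .getD 0: for nonempty runs the index len//2 is always in range, so Python never raises here.
def typical_burst_py (flags : List Bool) (truthy : Bool) : Int :=
  let st := flags.foldl (fun (p : List Int × Int) f =>
    if f == truthy then (p.1, p.2 + 1)
    else if p.2 > 0 then (p.1 ++ [p.2], 0) else (p.1, 0)) ([], 0)
  let runs := if st.2 > 0 then st.1 ++ [st.2] else st.1
  if runs = [] then 0
  else
    let s := PySem.List.sorted runs (fun x => x) false
    (PySem.List.pyGet? s (PySem.Int.floordiv (runs.length : Int) 2)).getD 0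

-- ===== PORT B =====
-- B's 'while True' loop: fuel makes it total; fuel = flags.length + 1 is proved sufficient below.
def pvSelect (counts : PySem.Dict Int Int) (k : Int) (L : Int) (fuel : Nat) : Int :=
  match fuel with
  | 0 => 0
  | fuel + 1 =>
    let c := counts.getD L 0
    if k < c then L else pvSelect counts (k - c) (L + 1) fuel

def typical_burst_py_alt (flags : List Bool) (truthy : Bool) : Int :=
  let st := flags.foldl (fun (p : PySem.Dict Int Int × Int × Int) f =>
    if f == truthy then (p.1, p.2.1, p.2.2 + 1)
    else if p.2.2 > 0 then (p.1.insert p.2.2 (p.1.getD p.2.2 0 + 1), p.2.1 + 1, 0)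
    else (p.1, p.2.1, 0)) (PySem.Dict.empty, 0, 0)
  let st' := if st.2.2 > 0 then (st.1.insert st.2.2 (st.1.getD st.2.2 0 + 1), st.2.1 + 1, (0:Int)) else st
  if st'.2.1 = 0 then 0
  else pvSelect st'.1 (PySem.Int.floordiv st'.2.1 2) 1 (flags.length + 1)

-- ===== PRECONDITION & SPEC =====
def Spec_typical_burst_py (flags : List Bool) (truthy : Bool) (out : Int) : Prop := out = typical_burst_py_alt flags truthy
instance (flags : List Bool) (truthy : Bool) (out : Int) : Decidable (Spec_typical_burst_py flags truthy out) := by unfold Spec_typical_burst_py; infer_instance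

-- ===== CLAIM (what is proved, stated in full; the proofs are below) =====
def Claim_equal_typical_burst_py : Prop := ∀ (flags : List Bool) (truthy : Bool), Dom_typical_burst_py flags truthy → Spec_typical_burst_py flags truthy (typical_burst_py flags truthy)

-- ===== LEMMAS AND PROOFS =====

-- A's and B's loop bodies, named for the proofs
def pvStepA (truthy : Bool) (p : List Int × Int) (f : Bool) : List Int × Int :=
  if f == truthy then (p.1, p.2 + 1)
  else if p.2 > 0 then (p.1 ++ [p.2], 0) else (p.1, 0)

def pvStepB (truthy : Bool) (p : PySem.Dict Int Int × Int × Int) (f : Bool) : PySem.Dict Int Int × Int × Int :=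
  if f == truthy then (p.1, p.2.1, p.2.2 + 1)
  else if p.2.2 > 0 then (p.1.insert p.2.2 (p.1.getD p.2.2 0 + 1), p.2.1 + 1, 0)
  else (p.1, p.2.1, 0)

lemma pvCounter_snoc (runs : List Int) (x : Int) :
    (PySem.Dict.counter runs).insert x ((PySem.Dict.counter runs).getD x 0 + 1)
      = PySem.Dict.counter (runs ++ [x]) := by
  rw [← PySem.Dict.foldl_insert_getD_add_one_eq_counter (runs ++ [x]), List.foldl_append,
      PySem.Dict.foldl_insert_getD_add_one_eq_counter runs]
  simp [List.foldl]

-- the two folds run in lockstep: B's state is (counter of A's runs, their number, same cur)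
lemma pvFold_rel (truthy : Bool) (flags : List Bool) :
    ∀ (runs : List Int) (cur : Int),
      flags.foldl (pvStepB truthy) (PySem.Dict.counter runs, (runs.length : Int), cur)
        = (PySem.Dict.counter (flags.foldl (pvStepA truthy) (runs, cur)).1,
           ((flags.foldl (pvStepA truthy) (runs, cur)).1.length : Int),
           (flags.foldl (pvStepA truthy) (runs, cur)).2) := by
  induction flags with
  | nil => intro runs cur; simp
  | cons f t ih =>
    intro runs cur
    simp only [List.foldl_cons]
    by_cases hf : f == truthy
    · simp only [pvStepA, pvStepB, hf, if_true]
      exact ih runs (cur + 1)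
    · by_cases hc : cur > 0
      · simp only [pvStepA, pvStepB, hf, hc, if_true]
        have := ih (runs ++ [cur]) 0
        rw [pvCounter_snoc] at *
        simpa using this
      · simp only [pvStepA, pvStepB, hf, hc]
        exact ih runs 0

-- invariant of A's loop: runs are positive, cur stays nonnegative, total mass bounded by flags seen
lemma pvFoldA_inv (truthy : Bool) (flags : List Bool) :
    ∀ (runs : List Int) (cur : Int), (∀ x ∈ runs, 0 < x) → 0 ≤ cur →
      (∀ x ∈ (flags.foldl (pvStepA truthy) (runs, cur)).1, 0 < x) ∧
      0 ≤ (flags.foldl (pvStepA truthy) (runs, cur)).2 ∧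
      (flags.foldl (pvStepA truthy) (runs, cur)).1.sum + (flags.foldl (pvStepA truthy) (runs, cur)).2
        ≤ runs.sum + cur + flags.length := by
  induction flags with
  | nil => intro runs cur h1 h2; simpa using ⟨h1, h2⟩
  | cons f t ih =>
    intro runs cur h1 h2
    simp only [List.foldl_cons, List.length_cons]
    by_cases hf : f == truthy
    · have hstep : pvStepA truthy (runs, cur) f = (runs, cur + 1) := by simp [pvStepA, hf]
      rw [hstep]
      have := ih runs (cur + 1) h1 (by omega)
      refine ⟨this.1, this.2.1, by push_cast; omega⟩
    · by_cases hc : cur > 0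
      · have hstep : pvStepA truthy (runs, cur) f = (runs ++ [cur], 0) := by
          simp [pvStepA, hf, hc]
        rw [hstep]
        have hmem : ∀ x ∈ runs ++ [cur], 0 < x := by
          intro x hx
          rcases List.mem_append.1 hx with h | h
          · exact h1 x h
          · simp at h; omega
        have := ih (runs ++ [cur]) 0 hmem (le_refl 0)
        refine ⟨this.1, this.2.1, ?_⟩
        have h3 := this.2.2
        simp only [List.sum_append, List.sum_cons, List.sum_nil] at h3
        push_cast at h3 ⊢; omega
      · have hstep : pvStepA truthy (runs, cur) f = (runs, 0) := by simp [pvStepA, hf, hc]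
        rw [hstep]
        have := ih runs 0 h1 (le_refl 0)
        refine ⟨this.1, this.2.1, ?_⟩
        have h3 := this.2.2
        push_cast at h3 ⊢; omega

-- a sorted list bounded below by L splits as (count L copies of L) ++ (elements > L)
lemma pvSplit (s : List Int) (L : Int) (h1 : s.Pairwise (· ≤ ·)) (h2 : ∀ x ∈ s, L ≤ x) :
    s = List.replicate (s.count L) L ++ s.filter (fun x => decide (L < x)) := by
  induction s with
  | nil => simp
  | cons a t ih =>
    have h1t := h1.tail
    have h2t : ∀ x ∈ t, L ≤ x := fun x hx => h2 x (List.mem_cons_of_mem _ hx)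
    by_cases ha : a = L
    · subst ha
      have hcount : (a :: t).count a = t.count a + 1 := by simp
      rw [hcount]
      have hfilt : (a :: t).filter (fun x => decide (a < x)) = t.filter (fun x => decide (a < x)) := by
        simp
      rw [hfilt, List.replicate_succ]
      simpa using ih h1t h2t
    · have hLa : L < a := lt_of_le_of_ne (h2 a (List.mem_cons_self)) (Ne.symm ha)
      have hall : ∀ x ∈ t, a ≤ x := fun x hx => (List.pairwise_cons.1 h1).1 x hx
      have hcount : (a :: t).count L = 0 := by
        rw [List.count_eq_zero]
        intro h
        rcases List.mem_cons.1 h with h | h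
        · exact ha h.symm
        · exact absurd (hall L h) (by omega)
      have hfilt : (a :: t).filter (fun x => decide (L < x)) = a :: t := by
        rw [List.filter_eq_self]
        intro x hx
        rcases List.mem_cons.1 hx with h | h
        · subst h; simpa using hLa
        · have := hall x h; simp; omega
      rw [hcount, hfilt]; simp

-- counting selection finds the kn-th element of the sorted list
lemma pvSelect_spec : ∀ (fuel : Nat) (s : List Int) (L : Int) (kn : Nat)
    (d : PySem.Dict Int Int)
    (h1 : s.Pairwise (· ≤ ·)) (h2 : ∀ x ∈ s, L ≤ x)
    (hd : ∀ v, L ≤ v → d.getD v 0 = (s.count v : Int))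
    (hk : kn < s.length) (hf : s[kn] < L + fuel),
    pvSelect d (kn : Int) L fuel = s[kn] := by
  intro fuel
  induction fuel with
  | zero =>
    intro s L kn d h1 h2 hd hk hf
    exact absurd (h2 _ (s.getElem_mem hk)) (by omega)
  | succ fuel ih =>
    intro s L kn d h1 h2 hd hk hf
    have hsplit := pvSplit s L h1 h2
    set c := s.count L with hc
    set s' := s.filter (fun x => decide (L < x)) with hs'
    have hlen : s.length = c + s'.length := by
      conv_lhs => rw [hsplit]
      simp
    have hdL := hd L (le_refl L)
    by_cases hlt : kn < c
    · have : pvSelect d (kn : Int) L (fuel + 1) = L := by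
        simp only [pvSelect, hdL]
        rw [if_pos (by exact_mod_cast hlt)]
      rw [this]
      have : s[kn] = (List.replicate c L ++ s')[kn]'(by simp only [List.length_append, List.length_replicate]; omega) :=
        List.getElem_of_eq hsplit hk
      rw [this, List.getElem_append_left (by simpa using hlt), List.getElem_replicate]
    · push_neg at hlt
      have hstep : pvSelect d (kn : Int) L (fuel + 1)
          = pvSelect d ((kn : Int) - c) (L + 1) fuel := by
        simp only [pvSelect, hdL]
        rw [if_neg (by push_neg; exact_mod_cast hlt)]
      have hcast : (kn : Int) - c = ((kn - c : Nat) : Int) := by omega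
      have h1' : s'.Pairwise (· ≤ ·) := h1.sublist List.filter_sublist
      have h2' : ∀ x ∈ s', L + 1 ≤ x := by
        intro x hx
        have := (List.mem_filter.1 hx).2
        simp at this; omega
      have hd' : ∀ v, L + 1 ≤ v → d.getD v 0 = (s'.count v : Int) := by
        intro v hv
        have hcnt : s.count v = s'.count v := by
          conv_lhs => rw [hsplit]
          rw [List.count_append, List.count_replicate]
          simp only [beq_iff_eq]
          rw [if_neg (by omega)]
          omega
        rw [hd v (by omega), hcnt]
      have hk' : kn - c < s'.length := by omega
      have helem : s'[kn - c] = s[kn] := by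
        have : s[kn] = (List.replicate c L ++ s')[kn]'(by simp only [List.length_append, List.length_replicate]; omega) :=
          List.getElem_of_eq hsplit hk
        rw [this, List.getElem_append_right (by simpa using hlt)]
        congr 1; simp
      rw [hstep, hcast, ih s' (L + 1) (kn - c) d h1' h2' hd' hk' (by rw [helem]; omega), helem]

-- the crux, stated over the final runs list: A's sort-and-index equals B's counting selection
lemma pvMain (runs : List Int) (N : Nat)
    (hpos : ∀ x ∈ runs, 0 < x) (hsum : runs.sum ≤ (N : Int)) :
    (if runs = [] then (0:Int)
     else (PySem.List.pyGet? (PySem.List.sorted runs (fun x => x) false)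
             (PySem.Int.floordiv (runs.length : Int) 2)).getD 0)
    = if (runs.length : Int) = 0 then 0
      else pvSelect (PySem.Dict.counter runs) (PySem.Int.floordiv ((runs.length : Nat) : Int) 2) 1 (N + 1) := by
  by_cases hnil : runs = []
  · simp [hnil]
  · have hlenpos : 0 < runs.length := List.length_pos_iff.2 hnil
    rw [if_neg hnil, if_neg (by exact_mod_cast hlenpos.ne')]
    set s := PySem.List.sorted runs (fun x => x) false with hs
    have hslen : s.length = runs.length := (PySem.List.sorted_perm runs (fun x => x) false).length_eq
    have hkn : (PySem.Int.floordiv (runs.length : Int) 2) = ((runs.length / 2 : Nat) : Int) := by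
      exact_mod_cast PySem.Int.floordiv_natCast runs.length 2
    set kn := runs.length / 2 with hknn
    have hklt : kn < s.length := by rw [hslen]; omega
    have hAval : (PySem.List.pyGet? s (PySem.Int.floordiv (runs.length : Int) 2)).getD 0 = s[kn] := by
      rw [hkn, PySem.List.pyGet?_natCast, List.getElem?_eq_getElem hklt]
      rfl
    rw [hAval, hkn]
    have h1 : s.Pairwise (· ≤ ·) := PySem.List.sorted_pairwise runs (fun x => x)
    have h2 : ∀ x ∈ s, (1:Int) ≤ x := by
      intro x hx
      have hxr : x ∈ runs := (PySem.List.mem_sorted _ _ _ _).1 hx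
      have := hpos x hxr
      omega
    have hd : ∀ v, (1:Int) ≤ v → (PySem.Dict.counter runs).getD v 0 = (s.count v : Int) := by
      intro v _
      rw [PySem.Dict.getD_counter]
      congr 1
      exact ((PySem.List.sorted_perm runs (fun x => x) false).count_eq v).symm
    have hf : s[kn] < 1 + ((N + 1 : Nat) : Int) := by
      have hmem : s[kn] ∈ runs := (PySem.List.mem_sorted _ _ _ _).1 (s.getElem_mem hklt)
      have hle : s[kn] ≤ runs.sum :=
        List.single_le_sum (fun x hx => le_of_lt (hpos x hx)) _ hmem
      push_cast
      omega
    exact (pvSelect_spec (N + 1) s 1 kn (PySem.Dict.counter runs) h1 h2 hd hklt hf).symm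

-- ===== VERDICT (by name: the statement is the Claim_ definition above) =====
theorem typical_burst_py_spec : Claim_equal_typical_burst_py := by
  intro flags truthy _
  unfold Spec_typical_burst_py typical_burst_py typical_burst_py_alt
  have hA : (fun (p : List Int × Int) f =>
      if f == truthy then (p.1, p.2 + 1)
      else if p.2 > 0 then (p.1 ++ [p.2], 0) else (p.1, 0)) = pvStepA truthy := rfl
  have hB : (fun (p : PySem.Dict Int Int × Int × Int) f =>
      if f == truthy then (p.1, p.2.1, p.2.2 + 1)
      else if p.2.2 > 0 then (p.1.insert p.2.2 (p.1.getD p.2.2 0 + 1), p.2.1 + 1, 0)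
      else (p.1, p.2.1, 0)) = pvStepB truthy := rfl
  rw [hA, hB]
  have h0 : (PySem.Dict.empty, (0:Int), (0:Int))
      = (PySem.Dict.counter ([] : List Int), ((([] : List Int).length : Nat) : Int), (0:Int)) := rfl
  rw [h0, pvFold_rel]
  have hinv := pvFoldA_inv truthy flags [] 0 (by simp) (le_refl 0)
  simp only [List.sum_nil, zero_add] at hinv
  revert hinv
  generalize flags.foldl (pvStepA truthy) ([], 0) = stA
  obtain ⟨rs, cur⟩ := stA
  intro hinv
  simp only at hinv
  simp only
  by_cases hc : cur > 0
  · rw [if_pos hc, if_pos hc]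
    simp only
    rw [pvCounter_snoc]
    have hlen : ((rs.length : Int) + 1) = (((rs ++ [cur]).length : Nat) : Int) := by
      push_cast [List.length_append]
      simp
    rw [hlen]
    refine pvMain (rs ++ [cur]) flags.length ?_ ?_
    · intro x hx
      rcases List.mem_append.1 hx with hx | hx
      · exact hinv.1 x hx
      · simp at hx; omega
    · simp only [List.sum_append, List.sum_cons, List.sum_nil]
      have := hinv.2.2
      omega
  · rw [if_neg hc, if_neg hc]
    refine pvMain rs flags.length hinv.1 ?_
    have := hinv.2.2
    have h2 := hinv.2.1
    omega
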